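-- pv_equiv track=rewrite | github.com/KM3NeT/km3pipe | km3modules/common.py | format_pathstring
-- ===== SOURCE A (Python) =====
-- def format_pathstring(instring):
--     instring = instring.replace("(", "['").replace(")", "']")
--     if instring.count(":")==1:
--         instring = instring.replace(":","[")+"]"
--     elif instring.count(":")>1:
--         firstone = True
--         while instring.find(":")>-1:
--             if firstone:
--                 instring = instring.replace(":","[", 1)
--                 firstone = False
--             else:
--                 instring = instring.replace(":","][")
--         instring = instring + "]"
--     return instring
-- ===== SOURCE B (Python) =====
-- def format_pathstring(instring):
--     instring = instring.replace("(", "['").replace(")", "']")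
--     parts = instring.split(":")
--     return parts[0] + "".join("[" + p + "]" for p in parts[1:])
-- ===== Notes on version B (the rewrite author's own statement) =====
-- stated objective: simpler
-- what changed: Replaced the colon-count branching and the while loop of repeated str.replace calls by one split on the colon separator followed by wrapping each non-first field in brackets.
import Mathlib
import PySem

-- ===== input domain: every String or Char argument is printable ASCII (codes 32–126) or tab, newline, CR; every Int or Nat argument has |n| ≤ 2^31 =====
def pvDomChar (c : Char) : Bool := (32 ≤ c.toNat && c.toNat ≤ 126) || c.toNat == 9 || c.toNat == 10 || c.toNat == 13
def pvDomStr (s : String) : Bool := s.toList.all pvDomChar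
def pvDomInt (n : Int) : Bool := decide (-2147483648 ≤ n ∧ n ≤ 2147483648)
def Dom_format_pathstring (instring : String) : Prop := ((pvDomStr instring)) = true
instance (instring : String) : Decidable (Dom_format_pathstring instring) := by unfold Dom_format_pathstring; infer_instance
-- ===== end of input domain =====

-- B replaces A's colon-count branching and repeated-replace while loop by one split on ':' with
-- each non-first field wrapped in brackets (objective: simpler); ports and proof work on List Char.

-- ===== PORT A =====
-- The lemmas before the port are cited by pvColonLoop's decreasing_by (termination of A's while loop).


-- replace with single-char old = per-char flatMap
theorem pvReplaceGoSingle (c : Char) (r : List Char) (fuel : Nat) (l acc : List Char) (h : l.length ≤ fuel) :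
    PySem.Chars.replace.go [c] r fuel l acc = acc.reverse ++ l.flatMap (fun x => if x = c then r else [x]) := by
  induction fuel generalizing l acc with
  | zero =>
    have : l = [] := List.length_eq_zero_iff.mp (Nat.le_zero.mp h)
    subst this; simp [PySem.Chars.replace.go]
  | succ n ih =>
    cases l with
    | nil => simp [PySem.Chars.replace.go]
    | cons x t =>
      simp only [PySem.Chars.replace.go]
      by_cases hx : x = c
      · subst hx
        simp only [List.isPrefixOf, BEq.rfl, Bool.true_and, if_pos]
        rw [ih]
        · simp
        · simpa using Nat.le_of_succ_le_succ h
      · have hp : ([c].isPrefixOf (x :: t)) = false := by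
          simp [List.isPrefixOf]
          exact fun hc => absurd hc.symm hx
        rw [hp]
        simp only [Bool.false_eq_true, if_false]
        rw [ih]
        · simp [hx]
        · simpa using Nat.le_of_succ_le_succ h

theorem pvReplaceSingle (c : Char) (r : List Char) (l : List Char) :
    PySem.Chars.replace l [c] r = l.flatMap (fun x => if x = c then r else [x]) := by
  simpa using pvReplaceGoSingle c r l.length l [] (le_refl _)

theorem pvFindSingletonPos (c : Char) (l : List Char) :
    PySem.Chars.find l [c] > -1 ↔ c ∈ l := by
  rw [← List.singleton_infix_iff, ← PySem.Chars.find_ne_neg_one_iff]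
  have := PySem.Chars.neg_one_le_find l [c]
  omega

def pvReplaceOnce (c : Char) (r : List Char) : List Char → List Char
  | [] => []
  | x :: t => if x = c then r ++ t else x :: pvReplaceOnce c r t

theorem pvCountReplaceOnce (c : Char) (r : List Char) (hr : c ∉ r) (l : List Char) (hm : c ∈ l) :
    (pvReplaceOnce c r l).count c < l.count c := by
  induction l with
  | nil => cases hm
  | cons x t ih =>
    by_cases hx : x = c
    · subst hx
      simp [pvReplaceOnce, List.count_cons, List.count_append, List.count_eq_zero.mpr hr]
    · have hmt : c ∈ t := by cases hm with | head => exact absurd rfl hx | tail _ h => exact h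
      simp only [pvReplaceOnce, if_neg hx, List.count_cons]
      have := ih hmt
      omega

theorem pvCountFlatReplZero (c : Char) (r : List Char) (hr : c ∉ r) (l : List Char) :
    (l.flatMap (fun x => if x = c then r else [x])).count c = 0 := by
  induction l with
  | nil => simp
  | cons x t ih =>
    by_cases hx : x = c
    · simp [hx, List.count_append, ih, List.count_eq_zero.mpr hr]
    · simp [hx, ih]

def pvColonLoop (l : List Char) (firstone : Bool) : List Char :=
  if PySem.Chars.find l [':'] > -1 then
    if firstone then pvColonLoop (pvReplaceOnce ':' ['['] l) false
    else pvColonLoop (PySem.Chars.replace l [':'] [']', '[']) false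
  else l
termination_by l.count ':'
decreasing_by
  · rename_i h _
    exact pvCountReplaceOnce ':' ['['] (by decide) l ((pvFindSingletonPos ':' l).mp h)
  · rename_i h _
    rw [pvReplaceSingle, pvCountFlatReplZero ':' [']', '['] (by decide)]
    exact List.count_pos_iff.mpr ((pvFindSingletonPos ':' l).mp h)


-- A: paren rewrite, then branch on the colon count; the while loop is pvColonLoop
-- (pvReplaceOnce hand-ports str.replace(old, new, 1) for a 1-char old — exact there).
def format_pathstring (instring : String) : String :=
  let t := PySem.Chars.replace (PySem.Chars.replace instring.toList ['('] ['[', '\'']) [')'] ['\'', ']']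
  if PySem.Chars.count t [':'] = 1 then
    String.mk (PySem.Chars.replace t [':'] ['['] ++ [']'])
  else if PySem.Chars.count t [':'] > 1 then
    String.mk (pvColonLoop t true ++ [']'])
  else String.mk t

-- ===== PORT B =====
-- B: same paren rewrite, then split on ':' and wrap each non-first field in brackets ("".join -> Chars.join []).
def format_pathstring_alt (instring : String) : String :=
  let t := PySem.Chars.replace (PySem.Chars.replace instring.toList ['('] ['[', '\'']) [')'] ['\'', ']']
  let parts := PySem.Chars.splitOn t [':']
  String.mk (parts.headD [] ++ PySem.Chars.join [] (parts.tail.map (fun p => '[' :: p ++ [']'])))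


-- ===== PRECONDITION & SPEC =====
def Spec_format_pathstring (instring : String) (out : String) : Prop := out = format_pathstring_alt instring
instance (instring : String) (out : String) : Decidable (Spec_format_pathstring instring out) := by unfold Spec_format_pathstring; infer_instance

-- ===== CLAIM (what is proved, stated in full; the proofs are below) =====
def Claim_equal_format_pathstring : Prop := ∀ (instring : String), Dom_format_pathstring instring → Spec_format_pathstring instring (format_pathstring instring)

-- ===== LEMMAS AND PROOFS =====
-- count with single-char sub = List.count
theorem pvCountGoSingle (c : Char) (fuel : Nat) (l : List Char) (acc : Nat) (h : l.length ≤ fuel) :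
    PySem.Chars.count.go [c] fuel l acc = acc + l.count c := by
  induction fuel generalizing l acc with
  | zero =>
    have : l = [] := List.length_eq_zero_iff.mp (Nat.le_zero.mp h)
    subst this; simp [PySem.Chars.count.go]
  | succ n ih =>
    cases l with
    | nil => simp [PySem.Chars.count.go]
    | cons x t =>
      simp only [PySem.Chars.count.go]
      by_cases hx : x = c
      · subst hx
        simp only [List.isPrefixOf, BEq.rfl, Bool.true_and, if_pos]
        rw [ih]
        · simp [List.count_cons]; omega
        · simpa using Nat.le_of_succ_le_succ h
      · have hp : ([c].isPrefixOf (x :: t)) = false := by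
          simp [List.isPrefixOf]; exact fun hc => absurd hc.symm hx
        rw [hp]
        simp only [Bool.false_eq_true, if_false]
        rw [ih]
        · simp [List.count_cons, hx]
        · simpa using Nat.le_of_succ_le_succ h

theorem pvCountSingle (c : Char) (l : List Char) :
    PySem.Chars.count l [c] = l.count c := by
  simpa [PySem.Chars.count] using pvCountGoSingle c l.length l 0 (le_refl _)

def pvSplitc (c : Char) : List Char → List (List Char)
  | [] => [[]]
  | x :: t =>
    if x = c then [] :: pvSplitc c t
    else
      match pvSplitc c t with
      | [] => [[x]]
      | h :: rest => (x :: h) :: rest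

theorem pvSplitcNeNil (c : Char) (l : List Char) : pvSplitc c l ≠ [] := by
  cases l with
  | nil => simp [pvSplitc]
  | cons x t =>
    simp only [pvSplitc]
    split
    · simp
    · split <;> simp

theorem pvModifyHeadId (l : List (List Char)) : List.modifyHead (fun p => p) l = l := by
  cases l <;> simp

theorem pvSplitOnGoSingle (c : Char) (fuel : Nat) (l cur : List Char) (acc : List (List Char)) (h : l.length ≤ fuel) :
    PySem.Chars.splitOn.go [c] fuel l cur acc =
      acc.reverse ++ ((pvSplitc c l).modifyHead (fun p => cur.reverse ++ p)) := by
  induction fuel generalizing l cur acc with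
  | zero =>
    have : l = [] := List.length_eq_zero_iff.mp (Nat.le_zero.mp h)
    subst this; simp [PySem.Chars.splitOn.go, pvSplitc]
  | succ n ih =>
    cases l with
    | nil => simp [PySem.Chars.splitOn.go, pvSplitc]
    | cons x t =>
      simp only [PySem.Chars.splitOn.go]
      by_cases hx : x = c
      · subst hx
        simp only [List.isPrefixOf, BEq.rfl, Bool.true_and, if_pos]
        rw [ih]
        · simp [pvSplitc, pvModifyHeadId]
        · simpa using Nat.le_of_succ_le_succ h
      · have hp : ([c].isPrefixOf (x :: t)) = false := by
          simp [List.isPrefixOf]; exact fun hc => absurd hc.symm hx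
        rw [hp]
        simp only [Bool.false_eq_true, if_false]
        rw [ih]
        · simp only [pvSplitc, if_neg hx]
          cases hs : pvSplitc c t with
          | nil => exact absurd hs (pvSplitcNeNil c t)
          | cons p rest => simp
        · simpa using Nat.le_of_succ_le_succ h

theorem pvSplitOnSingle (c : Char) (l : List Char) :
    PySem.Chars.splitOn l [c] = pvSplitc c l := by
  have := pvSplitOnGoSingle c (l.length + 1) l [] [] (by omega)
  simpa [PySem.Chars.splitOn, pvModifyHeadId] using this

def pvJoin (r : List Char) : List (List Char) → List Char
  | [] => []
  | [p] => p
  | p :: ps => p ++ r ++ pvJoin r ps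

theorem pvJoin_cons_cons (r p q : List Char) (ps : List (List Char)) :
    pvJoin r (p :: q :: ps) = p ++ r ++ pvJoin r (q :: ps) := rfl

theorem pvJoinSplitc (c : Char) (l : List Char) : pvJoin [c] (pvSplitc c l) = l := by
  induction l with
  | nil => simp [pvSplitc, pvJoin]
  | cons x t ih =>
    by_cases hx : x = c
    · subst hx
      rw [show pvSplitc x (x :: t) = [] :: pvSplitc x t by simp [pvSplitc]]
      cases hs : pvSplitc x t with
      | nil => exact absurd hs (pvSplitcNeNil x t)
      | cons p rest =>
        rw [pvJoin_cons_cons]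
        rw [hs] at ih
        simp [ih]
    · simp only [pvSplitc, if_neg hx]
      cases hs : pvSplitc c t with
      | nil => exact absurd hs (pvSplitcNeNil c t)
      | cons p rest =>
        rw [hs] at ih
        cases rest with
        | nil => simpa [pvJoin] using congrArg (x :: ·) ih
        | cons q rs =>
          rw [pvJoin_cons_cons]
          rw [pvJoin_cons_cons] at ih
          simpa using congrArg (x :: ·) ih

theorem pvSplitcNoC (c : Char) (l : List Char) : ∀ p ∈ pvSplitc c l, c ∉ p := by
  induction l with
  | nil => simp [pvSplitc]
  | cons x t ih =>
    by_cases hx : x = c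
    · subst hx
      simp only [pvSplitc, if_pos rfl]
      intro p hp
      cases hp with
      | head => simp
      | tail _ h => exact ih p h
    · simp only [pvSplitc, if_neg hx]
      cases hs : pvSplitc c t with
      | nil => exact absurd hs (pvSplitcNeNil c t)
      | cons q rest =>
        intro p hp
        cases hp with
        | head =>
          intro hm
          cases hm with
          | head => exact hx rfl
          | tail _ h => exact ih q (hs ▸ List.mem_cons_self) h
        | tail _ h => exact ih p (hs ▸ List.mem_cons_of_mem q h)

theorem pvSplitcLength (c : Char) (l : List Char) : (pvSplitc c l).length = l.count c + 1 := by
  induction l with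
  | nil => simp [pvSplitc]
  | cons x t ih =>
    by_cases hx : x = c
    · subst hx; simp [pvSplitc, List.count_cons, ih]
    · simp only [pvSplitc, if_neg hx]
      cases hs : pvSplitc c t with
      | nil => exact absurd hs (pvSplitcNeNil c t)
      | cons q rest =>
        rw [hs] at ih
        simp only [List.length_cons] at ih ⊢
        simp [List.count_cons, hx, ih]

theorem pvFlatReplFree (c : Char) (r : List Char) (p : List Char) (h : c ∉ p) :
    p.flatMap (fun x => if x = c then r else [x]) = p := by
  induction p with
  | nil => simp
  | cons x t ih =>
    have hx : x ≠ c := fun he => h (he ▸ List.mem_cons_self)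
    simp [hx, ih (fun hm => h (List.mem_cons_of_mem x hm))]

theorem pvFlatReplJoin (c : Char) (r : List Char) (ps : List (List Char))
    (hfree : ∀ p ∈ ps, c ∉ p) (hne : ps ≠ []) :
    (pvJoin [c] ps).flatMap (fun x => if x = c then r else [x]) = pvJoin r ps := by
  induction ps with
  | nil => exact absurd rfl hne
  | cons p ps ih =>
    cases ps with
    | nil => simpa [pvJoin] using pvFlatReplFree c r p (hfree p List.mem_cons_self)
    | cons q rs =>
      rw [pvJoin_cons_cons, pvJoin_cons_cons]
      rw [List.flatMap_append, List.flatMap_append]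
      rw [pvFlatReplFree c r p (hfree p List.mem_cons_self)]
      rw [ih (fun x hx => hfree x (List.mem_cons_of_mem p hx)) (by simp)]
      simp

theorem pvReplaceOnceAppend (c : Char) (r : List Char) (p s : List Char) (h : c ∉ p) :
    pvReplaceOnce c r (p ++ c :: s) = p ++ r ++ s := by
  induction p with
  | nil => simp [pvReplaceOnce]
  | cons x t ih =>
    have hx : x ≠ c := fun he => h (he ▸ List.mem_cons_self)
    simp only [List.cons_append, pvReplaceOnce, if_neg hx]
    simp [ih (fun hm => h (List.mem_cons_of_mem x hm))]

theorem pvNotMemJoin (c : Char) (r : List Char) (ps : List (List Char))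
    (hr : c ∉ r) (hfree : ∀ p ∈ ps, c ∉ p) : c ∉ pvJoin r ps := by
  induction ps with
  | nil => simp [pvJoin]
  | cons p ps ih =>
    cases ps with
    | nil => simpa [pvJoin] using hfree p List.mem_cons_self
    | cons q rs =>
      rw [pvJoin_cons_cons]
      intro hm
      rcases List.mem_append.mp hm with hm | hm
      · rcases List.mem_append.mp hm with hm | hm
        · exact hfree p List.mem_cons_self hm
        · exact hr hm
      · exact ih (fun x hx => hfree x (List.mem_cons_of_mem p hx)) hm

theorem pvWrap (ps : List (List Char)) (hne : ps ≠ []) :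
    '[' :: (pvJoin [']', '['] ps ++ [']']) = (ps.map (fun p => '[' :: p ++ [']'])).flatten := by
  induction ps with
  | nil => exact absurd rfl hne
  | cons p ps ih =>
    cases ps with
    | nil => simp [pvJoin]
    | cons q rs =>
      rw [pvJoin_cons_cons]
      rw [List.map_cons, List.flatten_cons, ← ih (by simp)]
      simp

theorem pvJoinNilFlatten (xs : List (List Char)) : PySem.Chars.join [] xs = xs.flatten := by
  induction xs with
  | nil => simp [PySem.Chars.join, List.intercalate]
  | cons x t ih =>
    cases t with
    | nil => simp [PySem.Chars.join, List.intercalate]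
    | cons y rs =>
      simp only [PySem.Chars.join] at ih ⊢
      rw [show List.intercalate ([]:List Char) (x :: y :: rs) = x ++ List.intercalate [] (y :: rs) by
        simp [List.intercalate, List.intersperse]]
      simp [ih]

theorem pvColonLoopDone (l : List Char) (b : Bool) (h : ':' ∉ l) : pvColonLoop l b = l := by
  rw [pvColonLoop]
  rw [if_neg (fun hc => h ((pvFindSingletonPos ':' l).mp hc))]

theorem pvColonLoopRun (p0 p1 p2 : List Char) (ps : List (List Char))
    (hfree : ∀ p ∈ p0 :: p1 :: p2 :: ps, (':':Char) ∉ p) :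
    pvColonLoop (pvJoin [':'] (p0 :: p1 :: p2 :: ps)) true =
      p0 ++ '[' :: pvJoin [']', '['] (p1 :: p2 :: ps) := by
  have h0 : (':':Char) ∉ p0 := hfree p0 List.mem_cons_self
  have hfree1 : ∀ p ∈ p1 :: p2 :: ps, (':':Char) ∉ p :=
    fun p hp => hfree p (List.mem_cons_of_mem p0 hp)
  have hmem : (':':Char) ∈ pvJoin [':'] (p0 :: p1 :: p2 :: ps) := by
    rw [pvJoin_cons_cons]; simp
  rw [pvColonLoop, if_pos ((pvFindSingletonPos ':' _).mpr hmem), if_pos rfl]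
  rw [show pvJoin [':'] (p0 :: p1 :: p2 :: ps) = p0 ++ ':' :: pvJoin [':'] (p1 :: p2 :: ps) by
    rw [pvJoin_cons_cons]; simp]
  rw [pvReplaceOnceAppend ':' ['['] p0 _ h0]
  have hmem2 : (':':Char) ∈ p0 ++ ['['] ++ pvJoin [':'] (p1 :: p2 :: ps) := by
    rw [pvJoin_cons_cons]; simp
  rw [pvColonLoop, if_pos ((pvFindSingletonPos ':' _).mpr hmem2)]
  simp only [Bool.false_eq_true, if_false]
  rw [pvReplaceSingle]
  rw [List.flatMap_append, List.flatMap_append]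
  rw [pvFlatReplFree ':' _ p0 h0]
  rw [pvFlatReplJoin ':' [']', '['] _ hfree1 (by simp)]
  have hdone : (':':Char) ∉ p0 ++ ['['].flatMap (fun x => if x = ':' then [']', '['] else [x]) ++ pvJoin [']', '['] (p1 :: p2 :: ps) := by
    intro hm
    rcases List.mem_append.mp hm with hm | hm
    · rcases List.mem_append.mp hm with hm | hm
      · exact h0 hm
      · simp at hm
    · exact pvNotMemJoin ':' [']', '['] _ (by decide) hfree1 hm
  rw [pvColonLoopDone _ _ hdone]
  simp

theorem pvMain (t : List Char) :
    (if PySem.Chars.count t [':'] = 1 then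
      String.mk (PySem.Chars.replace t [':'] ['['] ++ [']'])
    else if PySem.Chars.count t [':'] > 1 then
      String.mk (pvColonLoop t true ++ [']'])
    else String.mk t)
    = String.mk ((PySem.Chars.splitOn t [':']).headD [] ++
        PySem.Chars.join [] (((PySem.Chars.splitOn t [':']).tail).map (fun p => '[' :: p ++ [']']))) := by
  rw [pvCountSingle, pvSplitOnSingle]
  have hlen := pvSplitcLength ':' t
  have hfree := pvSplitcNoC ':' t
  have hjoin := pvJoinSplitc ':' t
  cases hp : pvSplitc ':' t with
  | nil => exact absurd hp (pvSplitcNeNil ':' t)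
  | cons p0 rest =>
    rw [hp] at hlen hfree hjoin
    cases rest with
    | nil =>
      have hc : t.count ':' = 0 := by simpa using hlen.symm
      rw [if_neg (by omega), if_neg (by omega)]
      simp only [List.headD_cons, List.tail_cons, List.map_nil]
      rw [pvJoinNilFlatten]
      simp only [pvJoin] at hjoin
      simp [hjoin]
    | cons p1 rest2 =>
      cases rest2 with
      | nil =>
        have hc : t.count ':' = 1 := by simpa using hlen.symm
        rw [if_pos hc]
        rw [← hjoin, pvReplaceSingle]
        rw [pvFlatReplJoin ':' ['['] _ hfree (by simp)]
        simp only [List.headD_cons, List.tail_cons, List.map_cons, List.map_nil]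
        rw [pvJoinNilFlatten]
        simp [pvJoin]
      | cons p2 ps =>
        have hc : t.count ':' ≥ 2 := by simp at hlen; omega
        rw [if_neg (by omega), if_pos (by omega)]
        rw [← hjoin, pvColonLoopRun p0 p1 p2 ps hfree]
        simp only [List.headD_cons, List.tail_cons]
        rw [pvJoinNilFlatten, ← pvWrap (p1 :: p2 :: ps) (by simp)]
        simp


-- ===== VERDICT (by name: the statement is the Claim_ definition above) =====
theorem format_pathstring_spec : Claim_equal_format_pathstring := by
  intro instring _
  unfold Spec_format_pathstring format_pathstring format_pathstring_alt
  exact pvMain _
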